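-- pv_equiv track=rewrite | github.com/yuanshuai0914/airs-daily-paper | skills/ai-rs-daily-papers/fetch_and_download.py | filter_new_only
-- ===== SOURCE A (Python) =====
-- from typing import Dict, List, Tuple, Optional
--
-- def paper_key(p: Dict) -> str:
--     return f"{p.get('source', 'unknown')}::{p.get('id', '')}"
--
-- def filter_new_only(by_source: Dict[str, Dict[str, List[Dict]]], sent_ids: set) -> Tuple[Dict[str, Dict[str, List[Dict]]], set]:
--     new_by_source: Dict[str, Dict[str, List[Dict]]] = {}
--     run_ids = set()
--
--     for source, cat_map in by_source.items():
--         new_by_source[source] = {}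
--         for cat, papers in cat_map.items():
--             new_list = []
--             for p in papers:
--                 k = paper_key(p)
--                 run_ids.add(k)
--                 if k not in sent_ids:
--                     new_list.append(p)
--             new_by_source[source][cat] = new_list
--
--     return new_by_source, run_ids
-- ===== SOURCE B (Python) =====
-- def paper_key(p):
--     return f"{p.get('source', 'unknown')}::{p.get('id', '')}"
--
-- def filter_new_only(by_source, sent_ids):
--     # pass 1: annotate every paper with its key, computed exactly once
--     keyed = {
--         source: {cat: [(paper_key(p), p) for p in papers]
--                  for cat, papers in cat_map.items()}
--         for source, cat_map in by_source.items()
--     }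
--     run_ids = {k for cat_map in keyed.values()
--                  for pairs in cat_map.values()
--                  for k, _ in pairs}
--     # the survivors are determined by a single set difference
--     fresh = run_ids.difference(sent_ids)
--     new_by_source = {
--         source: {cat: [p for k, p in pairs if k in fresh]
--                  for cat, pairs in cat_map.items()}
--         for source, cat_map in keyed.items()
--     }
--     return new_by_source, run_ids
-- ===== Notes on version B (the rewrite author's own statement) =====
-- stated objective: alternative
-- what changed: B replaces A's fused loop that tests every paper's key against sent_ids with a staged pipeline: an annotation pass computes each paper's key once, run_ids is built from the annotations, a single set difference fresh = run_ids - sent_ids determines the survivors, and the filtering pass keeps papers by positive membership of their precomputed key in fresh.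
import Mathlib
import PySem

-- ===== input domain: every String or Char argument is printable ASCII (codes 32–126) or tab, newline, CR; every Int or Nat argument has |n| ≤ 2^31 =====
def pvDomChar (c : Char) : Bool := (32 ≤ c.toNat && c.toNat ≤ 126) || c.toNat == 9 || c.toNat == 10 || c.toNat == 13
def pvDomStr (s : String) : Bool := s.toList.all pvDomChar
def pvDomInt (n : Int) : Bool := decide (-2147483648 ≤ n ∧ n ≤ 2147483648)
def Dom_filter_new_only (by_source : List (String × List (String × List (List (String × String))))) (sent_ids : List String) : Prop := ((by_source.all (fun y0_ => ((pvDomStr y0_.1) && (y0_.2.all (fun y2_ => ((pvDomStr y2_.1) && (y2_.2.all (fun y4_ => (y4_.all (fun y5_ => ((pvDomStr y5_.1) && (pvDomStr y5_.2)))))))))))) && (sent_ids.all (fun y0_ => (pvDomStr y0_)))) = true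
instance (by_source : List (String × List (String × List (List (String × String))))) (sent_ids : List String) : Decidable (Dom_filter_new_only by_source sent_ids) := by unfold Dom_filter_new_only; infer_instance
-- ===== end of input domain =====

-- B replaces A's fused loop (testing each paper's key against sent_ids) with a staged pipeline:
-- annotate papers with their key once, build run_ids, take one set difference fresh = run_ids - sent_ids,
-- and keep papers by positive membership of their precomputed key in fresh (objective: alternative).

-- shared helper: paper_key(p) = f"{p.get('source','unknown')}::{p.get('id','')}"
def pvPaperKey (p : List (String × String)) : String :=
  (PySem.Dict.mk p).getD "source" "unknown" ++ "::" ++ (PySem.Dict.mk p).getD "id" ""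

-- ===== PORT A =====
-- A: one fused loop over sources/categories/papers, building new_by_source and run_ids together.
def filter_new_only (by_source : List (String × List (String × List (List (String × String))))) (sent_ids : List String) : (List (String × List (String × List (List (String × String))))) × List String :=
  let init : (List (String × List (String × List (List (String × String))))) × PySem.Set String := ([], PySem.Set.ofList [])
  by_source.foldl (fun acc sc =>
    let inner := sc.2.foldl (fun acc2 cp =>
      let res := cp.2.foldl (fun (acc3 : List (List (String × String)) × PySem.Set String) p =>
        let k := pvPaperKey p
        let rids := acc3.2.add k
        if (PySem.Set.contains sent_ids k) then (acc3.1, rids) else (acc3.1 ++ [p], rids))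
        ([], acc2.2)
      (acc2.1 ++ [(cp.1, res.1)], res.2))
      (([] : List (String × List (List (String × String)))), acc.2)
    (acc.1 ++ [(sc.1, inner.1)], inner.2)) init

-- ===== PORT B =====
-- B: keyed annotation pass, then run_ids, then fresh = run_ids - sent_ids, then filter by key ∈ fresh.
def filter_new_only_alt (by_source : List (String × List (String × List (List (String × String))))) (sent_ids : List String) : (List (String × List (String × List (List (String × String))))) × List String :=
  let keyed := by_source.map (fun sc =>
    (sc.1, sc.2.map (fun cp => (cp.1, cp.2.map (fun p => (pvPaperKey p, p))))))
  let run_ids : PySem.Set String :=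
    PySem.Set.ofList (keyed.flatMap (fun sc => sc.2.flatMap (fun cp => cp.2.map (·.1))))
  let fresh : PySem.Set String := PySem.Set.diff run_ids sent_ids
  let new_by_source :=
    keyed.map (fun sc =>
      (sc.1, sc.2.map (fun cp =>
        (cp.1, (cp.2.filter (fun kp => PySem.Set.contains fresh kp.1)).map (·.2)))))
  (new_by_source, run_ids)

-- ===== PRECONDITION & SPEC =====
def Spec_filter_new_only (by_source : List (String × List (String × List (List (String × String))))) (sent_ids : List String) (out : (List (String × List (String × List (List (String × String))))) × List String) : Prop := out = filter_new_only_alt by_source sent_ids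
instance (by_source : List (String × List (String × List (List (String × String))))) (sent_ids : List String) (out : (List (String × List (String × List (List (String × String))))) × List String) : Decidable (Spec_filter_new_only by_source sent_ids out) := by
  unfold Spec_filter_new_only
  exact
    have i1 : DecidableEq (List (String × String)) := inferInstance
    have i2 : DecidableEq (List (List (String × String))) := @instDecidableEqList _ i1
    have i3 : DecidableEq (String × List (List (String × String))) := @instDecidableEqProd _ _ _ i2
    have i4 : DecidableEq (List (String × List (List (String × String)))) := @instDecidableEqList _ i3
    have i5 : DecidableEq (String × List (String × List (List (String × String)))) := @instDecidableEqProd _ _ _ i4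
    have i6 : DecidableEq (List (String × List (String × List (List (String × String))))) := @instDecidableEqList _ i5
    @instDecidableEqProd _ _ i6 _ out (filter_new_only_alt by_source sent_ids)

-- ===== CLAIM (what is proved, stated in full; the proofs are below) =====
def Claim_equal_filter_new_only : Prop := ∀ (by_source : List (String × List (String × List (List (String × String))))) (sent_ids : List String), Dom_filter_new_only by_source sent_ids → Spec_filter_new_only by_source sent_ids (filter_new_only by_source sent_ids)

-- ===== LEMMAS AND PROOFS =====

-- A's innermost loop is a filter paired with a key-collecting fold (two independent accumulators)
theorem pvInner (sent : List String) (papers : List (List (String × String)))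
    (l : List (List (String × String))) (s : PySem.Set String) :
    papers.foldl (fun (acc3 : List (List (String × String)) × PySem.Set String) p =>
        let k := pvPaperKey p
        let rids := acc3.2.add k
        if (PySem.Set.contains sent k) then (acc3.1, rids) else (acc3.1 ++ [p], rids)) (l, s)
      = (l ++ papers.filter (fun p => !(PySem.Set.contains sent (pvPaperKey p))),
         papers.foldl (fun s p => PySem.Set.add s (pvPaperKey p)) s) := by
  have hf : (fun (acc3 : List (List (String × String)) × PySem.Set String) p =>
        let k := pvPaperKey p
        let rids := acc3.2.add k
        if (PySem.Set.contains sent k) then (acc3.1, rids) else (acc3.1 ++ [p], rids))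
      = fun acc3 p =>
        ((fun l p => if (!(PySem.Set.contains sent (pvPaperKey p))) = true then l ++ [p] else l) acc3.1 p,
         (fun s p => PySem.Set.add s (pvPaperKey p)) acc3.2 p) := by
    funext a p
    by_cases h : pvPaperKey p ∈ sent <;> simp [h]
  rw [hf, PySem.List.foldl_prod_mk
        (f := fun l p => if (!(PySem.Set.contains sent (pvPaperKey p))) = true then l ++ [p] else l)
        (g := fun s p => PySem.Set.add s (pvPaperKey p)),
      PySem.List.foldl_append_if_eq_filter]

-- A's middle loop appends finished category entries while folding keys of each category's papers
theorem pvMid (sent : List String) (cat_map : List (String × List (List (String × String))))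
    (l : List (String × List (List (String × String)))) (s : PySem.Set String) :
    cat_map.foldl (fun acc2 cp =>
        let res := cp.2.foldl (fun (acc3 : List (List (String × String)) × PySem.Set String) p =>
          let k := pvPaperKey p
          let rids := acc3.2.add k
          if (PySem.Set.contains sent k) then (acc3.1, rids) else (acc3.1 ++ [p], rids))
          ([], acc2.2)
        (acc2.1 ++ [(cp.1, res.1)], res.2)) (l, s)
      = (l ++ cat_map.map (fun cp => (cp.1, cp.2.filter (fun p => !(PySem.Set.contains sent (pvPaperKey p))))),
         cat_map.foldl (fun s cp => cp.2.foldl (fun s p => PySem.Set.add s (pvPaperKey p)) s) s) := by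
  have hg : (fun (acc2 : List (String × List (List (String × String))) × PySem.Set String) cp =>
        let res := cp.2.foldl (fun (acc3 : List (List (String × String)) × PySem.Set String) p =>
          let k := pvPaperKey p
          let rids := acc3.2.add k
          if (PySem.Set.contains sent k) then (acc3.1, rids) else (acc3.1 ++ [p], rids))
          ([], acc2.2)
        (acc2.1 ++ [(cp.1, res.1)], res.2))
      = fun (acc2 : List (String × List (List (String × String))) × PySem.Set String)
            (cp : String × List (List (String × String))) =>
        ((fun l (cp : String × List (List (String × String))) =>
            l ++ [(cp.1, cp.2.filter (fun p => !(PySem.Set.contains sent (pvPaperKey p))))]) acc2.1 cp,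
         (fun s (cp : String × List (List (String × String))) =>
            cp.2.foldl (fun s p => PySem.Set.add s (pvPaperKey p)) s) acc2.2 cp) := by
    funext a cp
    simp only [pvInner, List.nil_append]
  rw [hg, PySem.List.foldl_prod_mk
        (f := fun l (cp : String × List (List (String × String))) =>
            l ++ [(cp.1, cp.2.filter (fun p => !(PySem.Set.contains sent (pvPaperKey p))))])
        (g := fun s (cp : String × List (List (String × String))) =>
            cp.2.foldl (fun s p => PySem.Set.add s (pvPaperKey p)) s),
      PySem.List.foldl_append_singleton_eq_map]

-- A's outer loop, fully split: nested map of filters + nested key fold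
theorem pvOuter (sent : List String) (bs : List (String × List (String × List (List (String × String)))))
    (l : List (String × List (String × List (List (String × String))))) (s : PySem.Set String) :
    bs.foldl (fun acc sc =>
        let inner := sc.2.foldl (fun acc2 cp =>
          let res := cp.2.foldl (fun (acc3 : List (List (String × String)) × PySem.Set String) p =>
            let k := pvPaperKey p
            let rids := acc3.2.add k
            if (PySem.Set.contains sent k) then (acc3.1, rids) else (acc3.1 ++ [p], rids))
            ([], acc2.2)
          (acc2.1 ++ [(cp.1, res.1)], res.2))
          (([] : List (String × List (List (String × String)))), acc.2)
        (acc.1 ++ [(sc.1, inner.1)], inner.2)) (l, s)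
      = (l ++ bs.map (fun sc => (sc.1, sc.2.map (fun cp =>
           (cp.1, cp.2.filter (fun p => !(PySem.Set.contains sent (pvPaperKey p))))))),
         bs.foldl (fun s sc => sc.2.foldl (fun s cp => cp.2.foldl (fun s p => PySem.Set.add s (pvPaperKey p)) s) s) s) := by
  have hh : (fun (acc : List (String × List (String × List (List (String × String)))) × PySem.Set String) sc =>
        let inner := sc.2.foldl (fun acc2 cp =>
          let res := cp.2.foldl (fun (acc3 : List (List (String × String)) × PySem.Set String) p =>
            let k := pvPaperKey p
            let rids := acc3.2.add k
            if (PySem.Set.contains sent k) then (acc3.1, rids) else (acc3.1 ++ [p], rids))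
            ([], acc2.2)
          (acc2.1 ++ [(cp.1, res.1)], res.2))
          (([] : List (String × List (List (String × String)))), acc.2)
        (acc.1 ++ [(sc.1, inner.1)], inner.2))
      = fun (acc : List (String × List (String × List (List (String × String)))) × PySem.Set String)
            (sc : String × List (String × List (List (String × String)))) =>
        ((fun l (sc : String × List (String × List (List (String × String)))) =>
            l ++ [(sc.1, sc.2.map (fun cp =>
              (cp.1, cp.2.filter (fun p => !(PySem.Set.contains sent (pvPaperKey p))))))]) acc.1 sc,
         (fun s (sc : String × List (String × List (List (String × String)))) =>
            sc.2.foldl (fun s cp => cp.2.foldl (fun s p => PySem.Set.add s (pvPaperKey p)) s) s) acc.2 sc) := by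
    funext a sc
    simp only [pvMid, List.nil_append]
  rw [hh, PySem.List.foldl_prod_mk
        (f := fun l (sc : String × List (String × List (List (String × String)))) =>
            l ++ [(sc.1, sc.2.map (fun cp =>
              (cp.1, cp.2.filter (fun p => !(PySem.Set.contains sent (pvPaperKey p))))))])
        (g := fun s (sc : String × List (String × List (List (String × String)))) =>
            sc.2.foldl (fun s cp => cp.2.foldl (fun s p => PySem.Set.add s (pvPaperKey p)) s) s),
      PySem.List.foldl_append_singleton_eq_map]

-- The flat key list B annotates and collects from
def pvKeys (bs : List (String × List (String × List (List (String × String))))) : List String :=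
  bs.flatMap (fun sc => sc.2.flatMap (fun cp => cp.2.map pvPaperKey))

-- For a key present in run_ids, membership in fresh = run_ids - sent is exactly non-membership in sent
theorem pvFreshIff (bs : List (String × List (String × List (List (String × String)))))
    (sent : List String) (k : String) (hk : k ∈ pvKeys bs) :
    PySem.Set.contains (PySem.Set.diff (PySem.Set.ofList (pvKeys bs)) sent) k
      = !(PySem.Set.contains sent k) := by
  by_cases h : k ∈ sent
  · simp [PySem.Set.mem_diff, h]
  · simp [PySem.Set.mem_diff, PySem.Set.mem_ofList, hk, h]

-- ===== VERDICT (by name: the statement is the Claim_ definition above) =====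
theorem filter_new_only_spec : Claim_equal_filter_new_only := by
  intro bs sent _
  show filter_new_only bs sent = filter_new_only_alt bs sent
  unfold filter_new_only filter_new_only_alt
  dsimp only
  rw [pvOuter]
  have hflat : ((bs.map (fun sc => (sc.1, sc.2.map (fun cp => (cp.1, cp.2.map (fun p => (pvPaperKey p, p))))))).flatMap
      (fun sc => sc.2.flatMap (fun cp => cp.2.map (·.1)))) = pvKeys bs := by
    simp [pvKeys, List.flatMap_map, List.map_map]
    rfl
  rw [hflat]
  refine Prod.ext ?_ ?_
  · -- first components: B's annotate → difference → filter pipeline equals A's map of filters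
    simp only [List.nil_append, List.map_map]
    refine List.map_congr_left ?_
    intro sc hsc
    simp only [Function.comp, List.map_map]
    refine Prod.ext rfl ?_
    refine List.map_congr_left ?_
    intro cp hcp
    simp only [Function.comp]
    refine Prod.ext rfl ?_
    rw [List.filter_map, List.map_map]
    have hq : ∀ p ∈ cp.2,
        ((fun kp : String × List (String × String) =>
            PySem.Set.contains (PySem.Set.diff (PySem.Set.ofList (pvKeys bs)) sent) kp.1)
          ∘ (fun p => (pvPaperKey p, p))) p
        = !(PySem.Set.contains sent (pvPaperKey p)) := by
      intro p hp
      exact pvFreshIff bs sent _ (by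
        simp only [pvKeys, List.mem_flatMap, List.mem_map]
        exact ⟨sc, hsc, cp, hcp, p, hp, rfl⟩)
    rw [List.filter_congr hq,
        show ((fun x : String × List (String × String) => x.2) ∘ fun p => (pvPaperKey p, p)) = id from rfl,
        List.map_id]
  · -- second components: both are the fold of Set.add over all keys in order
    rw [show (PySem.Set.ofList ([] : List String)) = [] from rfl, PySem.Set.ofList_eq_foldl]
    simp only [pvKeys, List.flatMap_def, List.foldl_flatten, List.foldl_map]
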